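-- pv_equiv track=rewrite | github.com/jkz1one/screener-3.6 | backend/screenbuilder.py | score
-- ===== SOURCE A (Python) =====
-- TIER_1 = {
--     "gap_up": 3,
--     "gap_down": 3,
--     "break_above_range": 3,
--     "break_below_range": 3,
--     "high_rel_vol": 3,
-- }
--
-- TIER_2 = {
--     "early_move": 2,
--     "squeeze_watch": 2,
--     "strong_sector": 2,
--     "weak_sector": 2,
-- }
--
-- TIER_3 = {
--     "near_range_high": 1,
--     "high_volume": 1,
--     "top_volume_gainer": 1,
--     "near_multi_day_high": 1,
--     "near_multi_day_low": 1,
--     "high_volume_no_breakout": 1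
-- }
--
-- RISK_FLAGS = {
--     "low_liquidity": -3,
--     "wide_spread": -3,
-- }
--
-- def score(info):
--     signals = info.get("signals", {})
--     score = 0
--     for sig in TIER_1:
--         if signals.get(sig):
--             score += TIER_1[sig]
--     for sig in TIER_2:
--         if signals.get(sig):
--             score += TIER_2[sig]
--     for sig in TIER_3:
--         if signals.get(sig):
--             score += TIER_3[sig]
--     for risk in RISK_FLAGS:
--         if signals.get(risk):
--             score += RISK_FLAGS[risk]
--     return score
-- ===== SOURCE B (Python) =====
-- TIER1_KEYS = ("gap_up", "gap_down", "break_above_range", "break_below_range", "high_rel_vol")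
-- TIER2_KEYS = ("early_move", "squeeze_watch", "strong_sector", "weak_sector")
-- TIER3_KEYS = ("near_range_high", "high_volume", "top_volume_gainer", "near_multi_day_high",
--               "near_multi_day_low", "high_volume_no_breakout")
-- RISK_KEYS = ("low_liquidity", "wide_spread")
--
-- def _weight(sig):
--     if sig in TIER1_KEYS:
--         return 3
--     if sig in TIER2_KEYS:
--         return 2
--     if sig in TIER3_KEYS:
--         return 1
--     if sig in RISK_KEYS:
--         return -3
--     return 0
--
-- def score(info):
--     signals = info.get("signals", {})
--     total = 0
--     for sig, on in signals.items():
--         if on: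
--             total += _weight(sig)
--     return total
-- ===== Notes on version B (the rewrite author's own statement) =====
-- stated objective: simpler
-- what changed: Replaces the four weight dicts and four fixed-key passes probing the signals with a single pass over the input signals themselves, classifying each truthy signal with a tier-membership weight function; Pre_ excludes association lists whose 'signals' value has duplicate keys, which cannot arise from a real Python dict and on which B's signals-driven pass would double-count.
import Mathlib
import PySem

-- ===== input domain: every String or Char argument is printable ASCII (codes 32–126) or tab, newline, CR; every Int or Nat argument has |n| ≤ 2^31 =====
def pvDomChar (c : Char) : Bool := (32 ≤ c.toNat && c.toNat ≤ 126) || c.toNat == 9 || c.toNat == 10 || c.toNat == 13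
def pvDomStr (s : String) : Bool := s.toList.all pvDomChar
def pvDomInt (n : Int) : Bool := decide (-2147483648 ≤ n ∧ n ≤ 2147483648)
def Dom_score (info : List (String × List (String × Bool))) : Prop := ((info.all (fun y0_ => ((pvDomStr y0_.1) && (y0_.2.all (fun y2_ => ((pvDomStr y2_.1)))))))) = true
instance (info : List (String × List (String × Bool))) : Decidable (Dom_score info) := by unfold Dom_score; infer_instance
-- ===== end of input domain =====

-- B replaces the four weight dicts and four fixed-key passes with a single accumulator pass over
-- the input signals, classifying each truthy signal with a tier-membership weight function (simpler).


-- ===== PORT A =====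
def tier1 : PySem.Dict String Int := PySem.Dict.mk
  [("gap_up", 3), ("gap_down", 3), ("break_above_range", 3), ("break_below_range", 3), ("high_rel_vol", 3)]

def tier2 : PySem.Dict String Int := PySem.Dict.mk
  [("early_move", 2), ("squeeze_watch", 2), ("strong_sector", 2), ("weak_sector", 2)]

def tier3 : PySem.Dict String Int := PySem.Dict.mk
  [("near_range_high", 1), ("high_volume", 1), ("top_volume_gainer", 1), ("near_multi_day_high", 1),
   ("near_multi_day_low", 1), ("high_volume_no_breakout", 1)]

def riskFlags : PySem.Dict String Int := PySem.Dict.mk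
  [("low_liquidity", -3), ("wide_spread", -3)]

def score (info : List (String × List (String × Bool))) : Int :=
  let signals : PySem.Dict String Bool := PySem.Dict.mk ((PySem.Dict.mk info).getD "signals" [])
  let s0 : Int := 0
  let s1 := tier1.keys.foldl (fun s sig => if signals.get? sig = some true then s + tier1.getD sig 0 else s) s0
  let s2 := tier2.keys.foldl (fun s sig => if signals.get? sig = some true then s + tier2.getD sig 0 else s) s1
  let s3 := tier3.keys.foldl (fun s sig => if signals.get? sig = some true then s + tier3.getD sig 0 else s) s2
  let s4 := riskFlags.keys.foldl (fun s risk => if signals.get? risk = some true then s + riskFlags.getD risk 0 else s) s3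
  s4

-- ===== PORT B =====
-- _weight: classify a signal name into its tier weight by membership tests (no dict)
def weightOf (sig : String) : Int :=
  if sig ∈ ["gap_up", "gap_down", "break_above_range", "break_below_range", "high_rel_vol"] then 3
  else if sig ∈ ["early_move", "squeeze_watch", "strong_sector", "weak_sector"] then 2
  else if sig ∈ ["near_range_high", "high_volume", "top_volume_gainer", "near_multi_day_high",
                 "near_multi_day_low", "high_volume_no_breakout"] then 1
  else if sig ∈ ["low_liquidity", "wide_spread"] then -3
  else 0

-- Source B's for-loop over signals.items() with the accumulator 'total', as structural recursion
def sumSignals (total : Int) : List (String × Bool) → Int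
  | [] => total
  | (sig, on) :: rest => sumSignals (if on then total + weightOf sig else total) rest

def score_alt (info : List (String × List (String × Bool))) : Int :=
  sumSignals 0 ((PySem.Dict.mk info).getD "signals" [])

-- ===== PRECONDITION & SPEC =====
-- Pre_ excludes only inputs whose "signals" association list carries duplicate keys: such a list
-- does not represent any Python dict (dict keys are unique), so no real input is excluded;
-- on duplicate keys B's single pass over the entries would count a signal twice.
def Pre_score (info : List (String × List (String × Bool))) : Prop :=
  ((((PySem.Dict.mk info).getD "signals" []).map Prod.fst).Nodup)
instance (info : List (String × List (String × Bool))) : Decidable (Pre_score info) := by unfold Pre_score; infer_instance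
def pvWitness_score : (List (String × List (String × Bool))) :=
  [("signals", [("gap_up", true), ("early_move", false), ("low_liquidity", true)])]

def Spec_score (info : List (String × List (String × Bool))) (out : Int) : Prop := out = score_alt info
instance (info : List (String × List (String × Bool))) (out : Int) : Decidable (Spec_score info out) := by unfold Spec_score; infer_instance

-- ===== CLAIM (what is proved, stated in full; the proofs are below) =====
def Claim_equal_score : Prop := ∀ (info : List (String × List (String × Bool))), Dom_score info → Pre_score info → Spec_score info (score info)

-- ===== LEMMAS AND PROOFS =====

-- proof-side merged weight table and its key list, in A's traversal order
def weightsAllP : PySem.Dict String Int := PySem.Dict.mk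
  [("gap_up", 3), ("gap_down", 3), ("break_above_range", 3), ("break_below_range", 3), ("high_rel_vol", 3),
   ("early_move", 2), ("squeeze_watch", 2), ("strong_sector", 2), ("weak_sector", 2),
   ("near_range_high", 1), ("high_volume", 1), ("top_volume_gainer", 1), ("near_multi_day_high", 1),
   ("near_multi_day_low", 1), ("high_volume_no_breakout", 1),
   ("low_liquidity", -3), ("wide_spread", -3)]

def allKeys : List String := weightsAllP.keys

-- per-key contribution read off a signals list
def term (sg : List (String × Bool)) (key : String) : Int :=
  if (PySem.Dict.mk sg).get? key = some true then weightsAllP.getD key 0 else 0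

theorem foldl_if_add {α : Type} (l : List α) (P : α → Prop) [DecidablePred P]
    (w : α → Int) (a : Int) :
    l.foldl (fun s x => if P x then s + w x else s) a
      = a + (l.map (fun x => if P x then w x else 0)).sum := by
  induction l generalizing a with
  | nil => simp
  | cons x l ih =>
      simp only [List.foldl_cons, List.map_cons, List.sum_cons, ih]
      split_ifs <;> ring

-- A's four fixed-key passes are the sum of per-key contributions over the merged key list
theorem score_eq_sum (info : List (String × List (String × Bool))) :
    score info = (allKeys.map (term ((PySem.Dict.mk info).getD "signals" []))).sum := by
  unfold score
  simp only [foldl_if_add]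
  simp [allKeys, term, weightsAllP, tier1, tier2, tier3, riskFlags, PySem.Dict.keys,
        PySem.Dict.getD, PySem.Dict.get?]
  ring_nf

-- B's weight classifier agrees with a lookup in the merged table
theorem weightOf_eq (k : String) : weightOf k = weightsAllP.getD k 0 := by
  unfold weightOf
  split_ifs with h1 h2 h3 h4
  · simp only [List.mem_cons, List.not_mem_nil, or_false] at h1
    rcases h1 with h | h | h | h | h <;> subst h <;> decide
  · simp only [List.mem_cons, List.not_mem_nil, or_false] at h2
    rcases h2 with h | h | h | h <;> subst h <;> decide
  · simp only [List.mem_cons, List.not_mem_nil, or_false] at h3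
    rcases h3 with h | h | h | h | h | h <;> subst h <;> decide
  · simp only [List.mem_cons, List.not_mem_nil, or_false] at h4
    rcases h4 with h | h <;> subst h <;> decide
  · symm
    apply PySem.Dict.getD_of_not_contains
    rw [PySem.Dict.contains_eq_decide_mem_keys]
    simp only [decide_eq_false_iff_not]
    intro hmem
    simp only [weightsAllP, PySem.Dict.keys, List.map_cons, List.map_nil,
      List.mem_cons, List.not_mem_nil, or_false] at hmem
    simp only [List.mem_cons, List.not_mem_nil, or_false] at h1 h2 h3 h4
    tauto

-- B's accumulator loop is the sum of the weights of the truthy entries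
theorem sumSignals_eq (total : Int) (sg : List (String × Bool)) :
    sumSignals total sg
      = total + (sg.map (fun kv : String × Bool => if kv.2 = true then weightsAllP.getD kv.1 0 else 0)).sum := by
  induction sg generalizing total with
  | nil => simp [sumSignals]
  | cons kv rest ih =>
      obtain ⟨k, v⟩ := kv
      simp only [sumSignals, ih, List.map_cons, List.sum_cons, weightOf_eq]
      split_ifs <;> ring

theorem get?_cons (k : String) (v : Bool) (rest : List (String × Bool)) (x : String) :
    (PySem.Dict.mk ((k, v) :: rest)).get? x
      = if k = x then some v else (PySem.Dict.mk rest).get? x := by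
  simpa using PySem.Dict.get?_mk_cons k v rest x

theorem get?_not_mem (rest : List (String × Bool)) (k : String)
    (hk : k ∉ rest.map Prod.fst) : (PySem.Dict.mk rest).get? k = none := by
  induction rest with
  | nil => simp [PySem.Dict.get?]
  | cons p rest ih =>
      rw [show (p = (p.1, p.2)) from rfl, get?_cons]
      simp only [List.map_cons, List.mem_cons] at hk
      push Not at hk
      rw [if_neg (by exact fun h => hk.1 h.symm)]
      exact ih hk.2

-- effect of one fresh signals entry on the fixed-key sum
theorem sum_term_cons (ks : List String) (hnd : ks.Nodup)
    (k : String) (v : Bool) (rest : List (String × Bool))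
    (hk : k ∉ rest.map Prod.fst) :
    (ks.map (term ((k, v) :: rest))).sum
      = (ks.map (term rest)).sum + (if k ∈ ks ∧ v = true then weightsAllP.getD k 0 else 0) := by
  induction ks with
  | nil => simp
  | cons k' ks ih =>
      simp only [List.map_cons, List.sum_cons]
      have hnd' : ks.Nodup := hnd.of_cons
      by_cases hkk : k = k'
      · subst hkk
        have hknotin : k ∉ ks := (List.nodup_cons.mp hnd).1
        have h1 : term ((k, v) :: rest) k = if v = true then weightsAllP.getD k 0 else 0 := by
          simp [term, get?_cons]
        have h2 : term rest k = 0 := by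
          simp [term, get?_not_mem rest k hk]
        rw [h1, h2, ih hnd']
        simp [hknotin]
        split_ifs <;> ring
      · have h1 : term ((k, v) :: rest) k' = term rest k' := by
          simp only [term, get?_cons, if_neg hkk]
        rw [h1, ih hnd']
        have hmem : (k ∈ k' :: ks ∧ v = true) ↔ (k ∈ ks ∧ v = true) := by
          simp [List.mem_cons, hkk]
        rw [if_congr hmem rfl rfl]
        ring

theorem allKeys_nodup : allKeys.Nodup := by decide

theorem getD_zero_of_not_mem (k : String) (hk : k ∉ allKeys) : weightsAllP.getD k 0 = 0 := by
  apply PySem.Dict.getD_of_not_contains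
  rw [PySem.Dict.contains_eq_decide_mem_keys]
  simpa [allKeys] using hk

theorem term_nil (key : String) : term [] key = 0 := by
  simp [term, PySem.Dict.get?]

-- main correspondence: the fixed-key sum equals the signals-driven sum, for unique keys
theorem main_eq (sg : List (String × Bool)) (hnd : (sg.map Prod.fst).Nodup) :
    (allKeys.map (term sg)).sum
      = (sg.map (fun kv : String × Bool => if kv.2 = true then weightsAllP.getD kv.1 0 else 0)).sum := by
  induction sg with
  | nil =>
      have h : term [] = fun _ => (0 : Int) := funext term_nil
      simp [h]
  | cons kv rest ih =>
      obtain ⟨k, v⟩ := kv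
      simp only [List.map_cons, List.nodup_cons] at hnd
      rw [sum_term_cons allKeys allKeys_nodup k v rest hnd.1, ih hnd.2,
          List.map_cons, List.sum_cons]
      by_cases hka : k ∈ allKeys
      · simp only [hka, true_and]
        split_ifs <;> ring
      · rw [getD_zero_of_not_mem k hka]
        simp [hka]

-- ===== VERDICT (by name: the statement is the Claim_ definition above) =====
theorem score_spec : Claim_equal_score := by
  intro info _ hpre
  unfold Spec_score
  rw [score_eq_sum, score_alt, sumSignals_eq, main_eq _ hpre]
  ring
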